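-- pv_equiv track=rewrite | github.com/sejeonglee/ps | leetcode/2441.py | findMaxK
-- ===== SOURCE A (Python) =====
-- from typing import List, Dict, Optional
--
-- def findMaxK(nums: List[int]) -> int:
--     waiting_pair: Dict[int, int] = {}
--     max_k: int = -1
--     for num in nums:
--         if num in waiting_pair:
--             max_k = max(max_k, abs(num))
--         else:
--             waiting_pair[-num] = num
--     return max_k
-- ===== SOURCE B (Python) =====
-- def findMaxK(nums):
--     s = sorted(nums)
--     i, j = 0, len(s) - 1
--     while i < j:
--         t = s[i] + s[j]
--         if t > 0:
--             j -= 1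
--         elif t < 0:
--             i += 1
--         else:
--             return s[j]
--     return -1
-- ===== Notes on version B (the rewrite author's own statement) =====
-- stated objective: alternative
-- what changed: Replaces the one-pass negated-key dictionary scan with sort-then-two-pointers: B sorts a copy and moves two pointers inward, returning the larger element of the first (hence largest) zero-sum pair.
import Mathlib
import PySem

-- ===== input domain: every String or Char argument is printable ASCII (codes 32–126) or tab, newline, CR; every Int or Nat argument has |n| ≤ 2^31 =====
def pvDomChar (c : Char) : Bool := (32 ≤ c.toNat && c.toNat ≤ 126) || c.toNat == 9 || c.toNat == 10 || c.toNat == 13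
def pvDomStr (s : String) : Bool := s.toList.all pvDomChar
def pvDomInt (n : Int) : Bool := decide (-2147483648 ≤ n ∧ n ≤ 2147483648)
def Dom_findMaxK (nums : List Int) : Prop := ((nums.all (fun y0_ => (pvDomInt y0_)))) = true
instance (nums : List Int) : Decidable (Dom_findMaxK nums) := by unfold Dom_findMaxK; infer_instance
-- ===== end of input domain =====

-- ===== PORT A =====
-- B replaces A's negated-key dict one-pass scan by sort + two pointers; same return value, nums is not mutated by either.
def findMaxKGo (d : PySem.Dict Int Int) (m : Int) : List Int → Int
  | [] => m
  | x :: rest =>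
    if d.contains x then findMaxKGo d (max m |x|) rest
    else findMaxKGo (d.insert (-x) x) m rest

def findMaxK (nums : List Int) : Int := findMaxKGo PySem.Dict.empty (-1) nums

-- ===== PORT B =====
def twoPtr (s : List Int) (i j : Nat) : Int :=
  if h : i < j then
    let t := s.getD i 0 + s.getD j 0
    if 0 < t then twoPtr s i (j - 1)
    else if t < 0 then twoPtr s (i + 1) j
    else s.getD j 0
  else -1
termination_by j - i
decreasing_by all_goals omega

def findMaxK_alt (nums : List Int) : Int :=
  let s := PySem.List.sorted nums (fun x => x) false
  twoPtr s 0 (s.length - 1)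

-- ===== PRECONDITION & SPEC =====
def Spec_findMaxK (nums : List Int) (out : Int) : Prop := out = findMaxK_alt nums
instance (nums : List Int) (out : Int) : Decidable (Spec_findMaxK nums out) := by unfold Spec_findMaxK; infer_instance

-- ===== CLAIM (what is proved, stated in full; the proofs are below) =====
def Claim_equal_findMaxK : Prop := ∀ (nums : List Int), Dom_findMaxK nums → Spec_findMaxK nums (findMaxK nums)

-- ===== LEMMAS AND PROOFS =====

/-- `k` is a valid answer candidate: `k ≥ 0` and the pair `(k, -k)` occurs at two (distinct) positions. -/
def pvValid (l : List Int) (k : Int) : Prop :=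
  0 ≤ k ∧ k ∈ l ∧ -k ∈ l ∧ (k ≠ 0 ∨ 2 ≤ l.count 0)

/-- `m` is the answer: `-1` or a valid candidate, and an upper bound of all valid candidates. -/
def pvCharM (l : List Int) (m : Int) : Prop :=
  (m = -1 ∨ pvValid l m) ∧ ∀ k, pvValid l k → k ≤ m

lemma pvCharM_unique {l : List Int} {m m' : Int}
    (h : pvCharM l m) (h' : pvCharM l m') : m = m' := by
  obtain ⟨h1, h2⟩ := h; obtain ⟨h1', h2'⟩ := h'
  rcases h1 with rfl | hv
  · rcases h1' with rfl | hv'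
    · rfl
    · have := h2 m' hv'; have := hv'.1; omega
  · rcases h1' with rfl | hv'
    · have := h2' m hv; have := hv.1; omega
    · exact le_antisymm (h2' m hv) (h2 m' hv')

lemma pvValid_mono (q : List Int) (x k : Int) (h : pvValid q k) : pvValid (q ++ [x]) k := by
  obtain ⟨h0, h1, h2, h3⟩ := h
  refine ⟨h0, by simp [h1], by simp [h2], ?_⟩
  rcases h3 with h3 | h3
  · exact Or.inl h3
  · right; simp only [List.count_append]; omega

lemma pvValid_perm {l l' : List Int} (h : l.Perm l') (k : Int) :
    pvValid l k ↔ pvValid l' k := by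
  unfold pvValid
  rw [h.mem_iff, h.mem_iff, h.count_eq]

lemma pvValid_append_cases (q : List Int) (x k : Int) (h : pvValid (q ++ [x]) k) :
    pvValid q k ∨ k = |x| := by
  by_cases hk : k = |x|
  · exact Or.inr hk
  obtain ⟨h0, h1, h2, h3⟩ := h
  left
  have h1' : k ∈ q := by
    rcases List.mem_append.mp h1 with h | h
    · exact h
    · simp only [List.mem_singleton] at h
      have : k = |x| := by subst h; exact (abs_of_nonneg h0).symm
      exact absurd this hk
  have h2' : -k ∈ q := by
    rcases List.mem_append.mp h2 with h | h
    · exact h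
    · simp only [List.mem_singleton] at h
      have : k = |x| := by rw [← h, abs_neg, abs_of_nonneg h0]
      exact absurd this hk
  refine ⟨h0, h1', h2', ?_⟩
  rcases eq_or_ne k 0 with hk0 | hk0
  · right
    have hx : x ≠ 0 := fun hx => hk (by rw [hk0, hx]; simp)
    rcases h3 with h3 | h3
    · exact absurd hk0 h3
    · have : List.count 0 [x] = 0 := by simp [List.count_singleton]; omega
      rw [List.count_append, this] at h3; omega
  · exact Or.inl hk0

/-- the valid candidate generated by the current element when its partner is already present -/
lemma pvValid_abs_append (q : List Int) (x : Int) (hx : -x ∈ q) :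
    pvValid (q ++ [x]) |x| := by
  refine ⟨abs_nonneg x, ?_, ?_, ?_⟩
  · by_cases h : 0 ≤ x
    · simp [abs_of_nonneg h]
    · rw [abs_of_neg (by omega)]; exact List.mem_append_left _ hx
  · by_cases h : 0 ≤ x
    · rw [abs_of_nonneg h]; exact List.mem_append_left _ hx
    · rw [abs_of_neg (by omega), neg_neg]; simp
  · by_cases hx0 : x = 0
    · right
      subst hx0
      have h1 : 1 ≤ q.count 0 := List.count_pos_iff.mpr hx
      have h2 : List.count 0 [(0 : Int)] = 1 := by simp
      rw [List.count_append, h2]; omega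
    · left; simpa using hx0

/-- loop invariant for A's dictionary pass -/
lemma findMaxKGo_char (rest : List Int) : ∀ (q : List Int) (d : PySem.Dict Int Int) (m : Int),
    (∀ y : Int, d.contains y = true → -y ∈ q) →
    (∀ y : Int, -y ∈ q → d.contains y = false → pvValid q |y|) →
    pvCharM q m →
    pvCharM (q ++ rest) (findMaxKGo d m rest) := by
  induction rest with
  | nil => intro q d m _ _ H3; simpa [findMaxKGo] using H3
  | cons x rest ih =>
    intro q d m H1 H2 H3
    rw [show q ++ x :: rest = (q ++ [x]) ++ rest by simp]
    by_cases hc : d.contains x = true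
    · rw [show findMaxKGo d m (x :: rest) = findMaxKGo d (max m |x|) rest by
        simp [findMaxKGo, hc]]
      have hval : pvValid (q ++ [x]) |x| := pvValid_abs_append q x (H1 x hc)
      apply ih (q ++ [x]) d (max m |x|)
      · intro y hy; exact List.mem_append_left _ (H1 y hy)
      · intro y hy hny
        rcases List.mem_append.mp hy with h | h
        · exact pvValid_mono _ _ _ (H2 y h hny)
        · simp only [List.mem_singleton] at h
          have : |y| = |x| := by rw [← h]; simp
          rw [this]; exact hval
      · constructor
        · rcases le_total m |x| with h | h
          · rw [max_eq_right h]; exact Or.inr hval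
          · rw [max_eq_left h]
            rcases H3.1 with h1 | h1
            · exfalso; have := abs_nonneg x; omega
            · exact Or.inr (pvValid_mono _ _ _ h1)
        · intro k hk
          rcases pvValid_append_cases q x k hk with h | h
          · exact le_trans (H3.2 k h) (le_max_left _ _)
          · rw [h]; exact le_max_right _ _
    · rw [show findMaxKGo d m (x :: rest) = findMaxKGo (d.insert (-x) x) m rest by
        simp [findMaxKGo, hc]]
      have hc' : d.contains x = false := by simpa using hc
      apply ih (q ++ [x]) (d.insert (-x) x) m
      · intro y hy
        rw [PySem.Dict.contains_insert] at hy
        rcases Bool.or_eq_true_iff.mp hy with h | h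
        · have : y = -x := by simpa using h
          subst this; simp
        · exact List.mem_append_left _ (H1 y h)
      · intro y hy hny
        rw [PySem.Dict.contains_insert] at hny
        simp only [Bool.or_eq_false_iff, beq_eq_false_iff_ne, ne_eq] at hny
        rcases List.mem_append.mp hy with h | h
        · exact pvValid_mono _ _ _ (H2 y h hny.2)
        · simp only [List.mem_singleton] at h
          exact absurd (by omega : y = -x) hny.1
      · constructor
        · rcases H3.1 with h1 | h1
          · exact Or.inl h1
          · exact Or.inr (pvValid_mono _ _ _ h1)
        · intro k hk
          rcases pvValid_append_cases q x k hk with h | h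
          · exact H3.2 k h
          · subst h
            apply H3.2
            obtain ⟨h0, h1, h2, h3⟩ := hk
            by_cases hx0 : x = 0
            · subst hx0
              have hcnt : 1 ≤ q.count 0 := by
                rcases h3 with h3 | h3
                · simp at h3
                · have h2' : List.count 0 [(0 : Int)] = 1 := by simp
                  rw [List.count_append, h2'] at h3; omega
              have h0q : (0 : Int) ∈ q := List.count_pos_iff.mp (by omega)
              have := H2 0 (by simpa using h0q) (by simpa using hc')
              simpa using this
            · have hnx : -x ∈ q := by
                have hmem : -x ∈ q ++ [x] := by
                  by_cases h : 0 ≤ x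
                  · have : -x = -|x| := by rw [abs_of_nonneg h]
                    rw [this]; exact h2
                  · have : -x = |x| := by rw [abs_of_neg (by omega)]
                    rw [this]; exact h1
                rcases List.mem_append.mp hmem with h | h
                · exact h
                · simp only [List.mem_singleton] at h; omega
              exact H2 x hnx hc'

lemma findMaxK_char (nums : List Int) : pvCharM nums (findMaxK nums) := by
  have := findMaxKGo_char nums [] PySem.Dict.empty (-1)
    (by intro y hy; rw [PySem.Dict.contains_empty] at hy; exact absurd hy (by simp))
    (by intro y hy; exact absurd hy (List.not_mem_nil))
    ⟨Or.inl rfl, fun k hk => absurd hk.2.1 (List.not_mem_nil)⟩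
  simpa [findMaxK] using this

lemma sorted_getD_mono {s : List Int} (hs : s.Pairwise (· ≤ ·)) {p q : Nat}
    (hpq : p ≤ q) (hq : q < s.length) : s.getD p 0 ≤ s.getD q 0 := by
  rcases eq_or_lt_of_le hpq with rfl | hlt
  · exact le_rfl
  · rw [List.getD_eq_getElem s 0 (by omega), List.getD_eq_getElem s 0 hq]
    exact List.pairwise_iff_getElem.mp hs p q (by omega) hq hlt

lemma count_two_of_indices {l : List Int} {a : Int} {p q : Nat} (hpq : p < q)
    (hq : q < l.length) (hp' : l[p]'(by omega) = a) (hq' : l[q]'hq = a) :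
    2 ≤ l.count a := by
  have hmem : a ∈ l.drop (p + 1) := by
    have hlen : q - (p + 1) < (l.drop (p + 1)).length := by
      rw [List.length_drop]; omega
    have : (l.drop (p + 1))[q - (p + 1)]'hlen = l[q]'hq := by
      rw [List.getElem_drop]
      congr 1; omega
    rw [← hq', ← this]
    exact List.getElem_mem hlen
  have h2 : List.Sublist [a] (l.drop (p + 1)) := List.singleton_sublist.mpr hmem
  have h3 : List.Sublist [a, a] (l[p]'(by omega) :: l.drop (p + 1)) := by
    rw [hp']; exact h2.cons₂ a
  have h4 : List.Sublist [a, a] (l.drop p) := by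
    rw [List.drop_eq_getElem_cons (by omega : p < l.length)]; exact h3
  exact List.replicate_sublist_iff.mp (h4.trans (List.drop_sublist p l))

lemma indices_of_count_two {l : List Int} {a : Int} (h : 2 ≤ l.count a) :
    ∃ p q, p < q ∧ q < l.length ∧ l[p]? = some a ∧ l[q]? = some a := by
  induction l with
  | nil => simp at h
  | cons x t ih =>
    by_cases hx : x = a
    · subst hx
      have hcnt : 1 ≤ t.count x := by
        rw [List.count_cons_self] at h; omega
      have hmem : x ∈ t := List.count_pos_iff.mp (by omega)
      obtain ⟨n, hn, hval⟩ := List.mem_iff_getElem.mp hmem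
      refine ⟨0, n + 1, by omega, by simp; omega, by simp, ?_⟩
      rw [List.getElem?_cons_succ]
      rw [List.getElem?_eq_getElem hn, hval]
    · have hcnt : 2 ≤ t.count a := by
        rw [List.count_cons_of_ne (by simpa using hx)] at h; exact h
      obtain ⟨p, q, hpq, hq, hp', hq'⟩ := ih hcnt
      exact ⟨p + 1, q + 1, by omega, by simp; omega, by simpa using hp', by simpa using hq'⟩

/-- two-pointer invariant: every valid candidate still has its witnessing pair inside [i, j] -/
lemma twoPtr_char (s : List Int) (hs : s.Pairwise (· ≤ ·)) (i j : Nat)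
    (hj : i < j → j < s.length)
    (hp : ∀ k, pvValid s k →
      ∃ p q, i ≤ p ∧ p < q ∧ q ≤ j ∧ s.getD p 0 = -k ∧ s.getD q 0 = k) :
    pvCharM s (twoPtr s i j) := by
  by_cases h : i < j
  · have hjl : j < s.length := hj h
    rw [twoPtr, dif_pos h]
    by_cases h1 : 0 < s.getD i 0 + s.getD j 0
    · rw [if_pos h1]
      apply twoPtr_char s hs i (j - 1) (by omega)
      intro k hk
      obtain ⟨p, q, hip, hpq, hqj, hP, hQ⟩ := hp k hk
      have hqne : q ≠ j := by
        intro hqj'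
        subst hqj'
        have hm : s.getD i 0 ≤ s.getD p 0 :=
          sorted_getD_mono hs hip (by omega)
        have hk0 := hk.1
        omega
      exact ⟨p, q, hip, hpq, by omega, hP, hQ⟩
    · by_cases h2 : s.getD i 0 + s.getD j 0 < 0
      · rw [if_neg h1, if_pos h2]
        apply twoPtr_char s hs (i + 1) j (fun _ => hjl)
        intro k hk
        obtain ⟨p, q, hip, hpq, hqj, hP, hQ⟩ := hp k hk
        have hpne : p ≠ i := by
          intro hpi
          subst hpi
          have hm : s.getD q 0 ≤ s.getD j 0 := sorted_getD_mono hs hqj hjl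
          have hk0 := hk.1
          omega
        exact ⟨p, q, by omega, hpq, hqj, hP, hQ⟩
      · rw [if_neg h1, if_neg h2]
        have hab : s.getD i 0 + s.getD j 0 = 0 := by omega
        have hmono : s.getD i 0 ≤ s.getD j 0 := sorted_getD_mono hs (by omega) hjl
        have hb0 : 0 ≤ s.getD j 0 := by omega
        have hbmem : s.getD j 0 ∈ s := by
          rw [List.getD_eq_getElem s 0 hjl]; exact List.getElem_mem hjl
        have hnbmem : -s.getD j 0 ∈ s := by
          rw [show -s.getD j 0 = s.getD i 0 by omega]
          rw [List.getD_eq_getElem s 0 (by omega : i < s.length)]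
          exact List.getElem_mem _
        constructor
        · right
          refine ⟨hb0, hbmem, hnbmem, ?_⟩
          by_cases hz : s.getD j 0 = 0
          · right
            apply count_two_of_indices (a := (0 : Int)) h hjl
            · rw [← List.getD_eq_getElem s 0 (by omega : i < s.length)]; omega
            · rw [← List.getD_eq_getElem s 0 hjl]; omega
          · exact Or.inl hz
        · intro k hk
          obtain ⟨p, q, hip, hpq, hqj, hP, hQ⟩ := hp k hk
          have := sorted_getD_mono hs hqj hjl
          omega
  · rw [twoPtr, dif_neg h]
    refine ⟨Or.inl rfl, ?_⟩
    intro k hk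
    obtain ⟨p, q, hip, hpq, hqj, _, _⟩ := hp k hk
    omega
termination_by j - i
decreasing_by all_goals omega

lemma pvCharM_perm {l l' : List Int} (h : l.Perm l') {m : Int}
    (hc : pvCharM l m) : pvCharM l' m := by
  obtain ⟨h1, h2⟩ := hc
  constructor
  · rcases h1 with h1 | h1
    · exact Or.inl h1
    · exact Or.inr ((pvValid_perm h m).mp h1)
  · intro k hk
    exact h2 k ((pvValid_perm h k).mpr hk)

lemma findMaxK_alt_char (nums : List Int) : pvCharM nums (findMaxK_alt nums) := by
  have hperm := PySem.List.sorted_perm nums (fun x => x) false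
  have hs : (PySem.List.sorted nums (fun x => x) false).Pairwise (· ≤ ·) := by
    have := PySem.List.sorted_pairwise (xs := nums) (key := fun x => x)
    simpa using this
  set s := PySem.List.sorted nums (fun x => x) false with hsdef
  have hchar : pvCharM s (twoPtr s 0 (s.length - 1)) := by
    apply twoPtr_char s hs 0 (s.length - 1) (by omega)
    intro k hk
    obtain ⟨hk0, hkm, hknm, hkz⟩ := hk
    by_cases hz : k = 0
    · subst hz
      have hcnt : 2 ≤ s.count 0 := by
        rcases hkz with h | h
        · exact absurd rfl h
        · exact h
      obtain ⟨p, q, hpq, hq, hp', hq'⟩ := indices_of_count_two hcnt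
      refine ⟨p, q, by omega, hpq, by omega, ?_, ?_⟩
      · rw [List.getD_eq_getElem?_getD, hp']; simp
      · rw [List.getD_eq_getElem?_getD, hq']; simp
    · have hkpos : 0 < k := by omega
      obtain ⟨ia, hia, hvia⟩ := List.mem_iff_getElem.mp hkm
      obtain ⟨ib, hib, hvib⟩ := List.mem_iff_getElem.mp hknm
      have hne : ib < ia := by
        rcases lt_trichotomy ia ib with hlt | heq | hgt
        · exfalso
          have := sorted_getD_mono hs (le_of_lt hlt) hib
          rw [List.getD_eq_getElem s 0 hia, List.getD_eq_getElem s 0 hib, hvia, hvib] at this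
          omega
        · exfalso; subst heq; rw [hvia] at hvib; omega
        · exact hgt
      refine ⟨ib, ia, by omega, hne, by omega, ?_, ?_⟩
      · rw [List.getD_eq_getElem s 0 hib, hvib]
      · rw [List.getD_eq_getElem s 0 hia, hvia]
  have halt : findMaxK_alt nums = twoPtr s 0 (s.length - 1) := rfl
  rw [halt]
  exact pvCharM_perm hperm hchar

-- ===== VERDICT (by name: the statement is the Claim_ definition above) =====
theorem findMaxK_spec : Claim_equal_findMaxK := by
  intro nums _
  show findMaxK nums = findMaxK_alt nums
  exact pvCharM_unique (findMaxK_char nums) (findMaxK_alt_char nums)
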